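-- pv_equiv track=rewrite | github.com/pypi-data/pypi-mirror-31 | packages/ipyatom/ipyatom-0.1.0-py2.py3-none-any.whl/ipyatom/close_neighbour_analysis.py | _longest_path
-- ===== SOURCE A (Python) =====
-- def _longest_path(tree, start, lastnode=None):
--     """a recursive function to compute a maximum unbroken chain given a tree
--
--     Parameters
--     ----------
--     tree : object
--     start  : int
--
--     Examples
--     --------
--     >>> _longest_path({0: [1, 3], 1: [2, 0], 2: [1, 3], 3: [2,0], 8: [9], 9: [8]}, 0)
--     [0, 3, 2, 1, 0]
--
--     """
--     if start not in tree:
--         return []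
--     new_tree = tree.copy()
--     # nodes = new_tree.pop(start) # can use if don't want to complete loops
--     nodes = new_tree[start]
--     new_tree[start] = []  # don't get stuck in loop
--
--     path = []
--     for node in nodes:
--         if node == lastnode:
--             continue  # can't go back to lastnode, e.g. 1->2->1
--         new_path = _longest_path(new_tree, node, start)
--         if len(new_path) > len(path):
--             path = new_path
--     path.append(start)
--     return path
-- ===== SOURCE B (Python) =====
-- def _longest_path(tree, start, lastnode=None):
--     """Level-synchronous breadth-first search over the space of
--     non-backtracking walks, instead of A's recursive depth-first search
--     with a per-call copy of the whole adjacency dict.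
--
--     Partial walks are stored deepest-node-first (so the answer needs no
--     final reversal and already matches A's deep-to-start order); a walk is
--     marked not-extendable once it revisits one of its own nodes.  Because
--     every walk of n nodes is completed while processing level n-1 or n,
--     completions arrive in non-decreasing length and, within a length, in
--     first-branch-first order, so a single strict '>' scan reproduces A's
--     tie-breaking exactly.
--     """
--     if start not in tree:
--         return []
--     best = []
--     frontier = [([start], True)]
--     while frontier:
--         nxt = []
--         for path, alive in frontier:
--             if not alive:
--                 if len(path) > len(best):
--                     best = path
--                 continue
--             node = path[0]
--             prev = path[1] if len(path) > 1 else lastnode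
--             grew = False
--             for nb in tree[node]:
--                 if nb == prev or nb not in tree:
--                     continue
--                 grew = True
--                 nxt.append(([nb] + path, nb not in path))
--             if not grew and len(path) > len(best):
--                 best = path
--         frontier = nxt
--     return best
-- ===== Notes on version B (the rewrite author's own statement) =====
-- stated objective: alternative
-- what changed: B replaces A's recursive depth-first search (which copies the whole adjacency dict at every call and compares suffixes bottom-up) with an iterative level-synchronous breadth-first search over a frontier of partial walks stored deepest-first, collecting completed walks level by level and keeping the first strictly-longest one; correct because completions arrive in non-decreasing length and, within a length, in A's first-branch-first tie order.
import Mathlib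
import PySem

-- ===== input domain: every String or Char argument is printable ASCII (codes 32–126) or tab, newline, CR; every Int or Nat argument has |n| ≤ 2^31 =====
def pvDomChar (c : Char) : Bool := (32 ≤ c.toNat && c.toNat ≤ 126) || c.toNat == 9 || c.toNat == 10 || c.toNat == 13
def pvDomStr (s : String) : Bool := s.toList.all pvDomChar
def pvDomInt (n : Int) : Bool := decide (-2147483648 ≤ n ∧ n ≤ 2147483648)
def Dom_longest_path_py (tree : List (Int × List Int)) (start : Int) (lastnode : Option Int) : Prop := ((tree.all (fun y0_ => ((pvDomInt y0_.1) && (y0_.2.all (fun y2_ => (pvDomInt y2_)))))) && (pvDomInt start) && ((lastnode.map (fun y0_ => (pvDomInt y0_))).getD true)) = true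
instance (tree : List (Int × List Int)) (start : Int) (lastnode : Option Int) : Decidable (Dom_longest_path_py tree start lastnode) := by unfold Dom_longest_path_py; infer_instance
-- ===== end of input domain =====

-- B replaces A's recursive depth-first search (per-call copy of the adjacency dict) with an
-- iterative level-synchronous breadth-first search over a frontier of partial walks; same result.

-- ===== PORT A =====
-- fuel is a totality guard only: tree.length + 2 bounds the recursion depth (each non-terminal
-- level empties one more nonempty entry of the dict), so the Python recursion never exhausts it.
def lpGoA (fuel : Nat) (tree : PySem.Dict Int (List Int)) (start : Int) (lastnode : Option Int) : List Int :=
  match fuel with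
  | 0 => []
  | fuel + 1 =>
    match tree.get? start with
    | none => []                                    -- if start not in tree: return []
    | some nodes =>
      let newTree := tree.insert start []           -- new_tree = tree.copy(); new_tree[start] = []
      let path := nodes.foldl (fun path node =>
        if some node = lastnode then path           -- if node == lastnode: continue
        else
          let newPath := lpGoA fuel newTree node (some start)
          if newPath.length > path.length then newPath else path) []
      path ++ [start]                               -- path.append(start)

def longest_path_py (tree : List (Int × List Int)) (start : Int) (lastnode : Option Int) : List Int :=
  lpGoA (tree.length + 2) (PySem.Dict.mk tree) start lastnode

-- ===== PORT B =====
-- One frontier item of Source B's BFS: a partial walk (deepest node first) plus its alive flag.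
-- lpStepItemB is the body of Source B's 'for path, alive in frontier' loop (the accumulator is the
-- pair (nxt, best)); the inner fold is the 'for nb in tree[node]' loop over (nxt, grew).
def lpStepItemB (tree : PySem.Dict Int (List Int)) (lastnode : Option Int)
    (acc : List (List Int × Bool) × List Int) (item : List Int × Bool) :
    List (List Int × Bool) × List Int :=
  let nxt := acc.1
  let best := acc.2
  let path := item.1
  if item.2 = false then
    (nxt, if path.length > best.length then path else best)
  else
    match path with
    | [] => (nxt, best)                             -- unreachable: frontier walks are nonempty
    | node :: rest =>
      let prev : Option Int := match rest with | [] => lastnode | q :: _ => some q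
      let r := ((tree.get? node).getD []).foldl (fun (acc2 : List (List Int × Bool) × Bool) nb =>
          if some nb = prev ∨ (tree.get? nb).isNone then acc2   -- continue
          else (acc2.1 ++ [(nb :: path, !(path.contains nb))], true)) (nxt, false)
      (r.1, if r.2 = false ∧ path.length > best.length then path else best)

-- the 'while frontier' loop; fuel tree.length + 2 is a totality guard (the frontier is empty
-- after at most that many levels, because alive walks have distinct nodes that are all keys).
def lpLoopB (tree : PySem.Dict Int (List Int)) (lastnode : Option Int) :
    Nat → List (List Int × Bool) → List Int → List Int
  | 0, _, best => best
  | _ + 1, [], best => best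
  | fuel + 1, f :: fs, best =>
    let r := (f :: fs).foldl (lpStepItemB tree lastnode) ([], best)
    lpLoopB tree lastnode fuel r.1 r.2

def longest_path_py_alt (tree : List (Int × List Int)) (start : Int) (lastnode : Option Int) : List Int :=
  let T := PySem.Dict.mk tree
  if (T.get? start).isNone then []                  -- if start not in tree: return []
  else lpLoopB T lastnode (tree.length + 2) [([start], true)] []

-- ===== PRECONDITION & SPEC =====
def Spec_longest_path_py (tree : List (Int × List Int)) (start : Int) (lastnode : Option Int) (out : List Int) : Prop := out = longest_path_py_alt tree start lastnode
instance (tree : List (Int × List Int)) (start : Int) (lastnode : Option Int) (out : List Int) : Decidable (Spec_longest_path_py tree start lastnode out) := by unfold Spec_longest_path_py; infer_instance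

-- ===== CLAIM (what is proved, stated in full; the proofs are below) =====
def Claim_equal_longest_path_py : Prop := ∀ (tree : List (Int × List Int)) (start : Int) (lastnode : Option Int), Dom_longest_path_py tree start lastnode → Spec_longest_path_py tree start lastnode (longest_path_py tree start lastnode)

-- ===== LEMMAS AND PROOFS =====

-- 'pick' is the comparison step both programs share: keep the first strictly-longest list.
def pick (a b : List Int) : List Int := if b.length > a.length then b else a

def fm (W : List (List Int)) : List Int := W.foldl pick []

theorem pick3 (a w g : List Int) : pick (pick a w) g = pick a (pick (pick [] w) g) := by
  unfold pick
  split_ifs <;> simp_all <;> omega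

theorem foldl_pick_acc (G : List (List Int)) : ∀ acc, G.foldl pick acc = pick acc (G.foldl pick []) := by
  induction G with
  | nil => intro acc; simp [pick]
  | cons w G ih =>
    intro acc
    simp only [List.foldl_cons]
    rw [ih (pick acc w), ih (pick [] w), pick3]

theorem length_pick (a b : List Int) : (pick a b).length = max a.length b.length := by
  unfold pick; split_ifs <;> omega

def mLen (W : List (List Int)) : Nat := (W.map List.length).foldr max 0

theorem mLen_cons (w : List Int) (W : List (List Int)) : mLen (w :: W) = max w.length (mLen W) := rfl

theorem length_pick_nil (w : List Int) : (pick [] w).length = w.length := by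
  unfold pick; split_ifs <;> simp_all

theorem length_fm (W : List (List Int)) : (fm W).length = mLen W := by
  induction W with
  | nil => simp [fm, mLen]
  | cons w W ih =>
    show ((w :: W).foldl pick []).length = _
    rw [List.foldl_cons, foldl_pick_acc, length_pick, length_pick_nil, mLen_cons]
    show max w.length (fm W).length = _
    rw [ih]

theorem length_le_mLen {w : List Int} {W : List (List Int)} (h : w ∈ W) : w.length ≤ mLen W := by
  induction W with
  | nil => cases h
  | cons u W ih =>
    rcases List.mem_cons.mp h with h | h
    · subst h; rw [mLen_cons]; omega
    · rw [mLen_cons]; have := ih h; omega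

theorem mLen_attain (W : List (List Int)) : W = [] ∨ ∃ w ∈ W, w.length = mLen W := by
  induction W with
  | nil => exact Or.inl rfl
  | cons u W ih =>
    right
    rcases ih with h | ⟨w, hw, hlen⟩
    · subst h; exact ⟨u, List.mem_cons_self, by simp [mLen]⟩
    · rw [mLen_cons]
      by_cases h : mLen W ≤ u.length
      · exact ⟨u, List.mem_cons_self, by omega⟩
      · exact ⟨w, List.mem_cons_of_mem _ hw, by omega⟩

theorem fm_char (W : List (List Int)) :
    fm W = ((W.filter (fun w => decide (w.length = mLen W))).head?).getD [] := by
  induction W with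
  | nil => simp [fm]
  | cons w W ih =>
    have hfm : fm (w :: W) = pick (pick [] w) (fm W) := by
      show ((w :: W).foldl pick []) = _
      rw [List.foldl_cons, foldl_pick_acc]
      rfl
    have hpw : pick [] w = w := by
      unfold pick; split_ifs <;> simp_all
    rw [hfm, hpw, mLen_cons]
    by_cases h : mLen W ≤ w.length
    · have hmax : max w.length (mLen W) = w.length := max_eq_left h
      rw [hmax]
      have : pick w (fm W) = w := by
        unfold pick
        rw [length_fm]
        split_ifs with hgt
        · exact absurd hgt (by omega)
        · rfl
      rw [this]
      simp
    · have hmax : max w.length (mLen W) = mLen W := max_eq_right (Nat.le_of_lt (Nat.lt_of_not_le h))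
      rw [hmax]
      have hne : ¬ (w.length = mLen W) := by omega
      have : pick w (fm W) = fm W := by
        unfold pick
        rw [length_fm]
        have hW : W ≠ [] := by
          intro h0; subst h0; simp [mLen] at h
        split_ifs with hc
        · rfl
        · exfalso; omega
      rw [this, ih]
      simp [hne]

theorem fm_congr_of_filters {W1 W2 : List (List Int)}
    (h : ∀ L, W1.filter (fun w => decide (w.length = L)) = W2.filter (fun w => decide (w.length = L))) :
    fm W1 = fm W2 := by
  rcases mLen_attain W1 with h1 | ⟨w1, hw1, hl1⟩
  · subst h1
    rcases mLen_attain W2 with h2 | ⟨w2, hw2, hl2⟩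
    · subst h2; rfl
    · exfalso
      have := h (mLen W2)
      have hmem : w2 ∈ W2.filter (fun w => decide (w.length = mLen W2)) := by
        simp [List.mem_filter, hw2, hl2]
      rw [← this] at hmem
      simp at hmem
  · rcases mLen_attain W2 with h2 | ⟨w2, hw2, hl2⟩
    · exfalso
      subst h2
      have := h (mLen W1)
      have hmem : w1 ∈ W1.filter (fun w => decide (w.length = mLen W1)) := by
        simp [List.mem_filter, hw1, hl1]
      rw [this] at hmem
      simp at hmem
    · have hle1 : mLen W1 ≤ mLen W2 := by
        have := h (mLen W1)
        have hmem : w1 ∈ W1.filter (fun w => decide (w.length = mLen W1)) := by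
          simp [List.mem_filter, hw1, hl1]
        rw [this] at hmem
        rw [List.mem_filter] at hmem
        have := length_le_mLen hmem.1
        simp at hmem
        omega
      have hle2 : mLen W2 ≤ mLen W1 := by
        have := h (mLen W2)
        have hmem : w2 ∈ W2.filter (fun w => decide (w.length = mLen W2)) := by
          simp [List.mem_filter, hw2, hl2]
        rw [← this] at hmem
        rw [List.mem_filter] at hmem
        have := length_le_mLen hmem.1
        simp at hmem
        omega
      have hm : mLen W1 = mLen W2 := le_antisymm hle1 hle2
      rw [fm_char, fm_char, hm, h (mLen W2)]

theorem foldl_pick_congr_of_filters {W1 W2 : List (List Int)} (b : List Int)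
    (h : ∀ L, W1.filter (fun w => decide (w.length = L)) = W2.filter (fun w => decide (w.length = L))) :
    W1.foldl pick b = W2.foldl pick b := by
  rw [foldl_pick_acc W1 b, foldl_pick_acc W2 b]
  show pick b (fm W1) = pick b (fm W2)
  rw [fm_congr_of_filters h]

-- ---------- the common reference object: the preorder list of complete walks ----------

-- the previous node of a partial walk stored deepest-first
def prevOf (lastnode : Option Int) (rest : List Int) : Option Int :=
  match rest with | [] => lastnode | q :: _ => some q

-- the neighbours one may step to from 'node' (not the previous node, and a key of the dict)
def csOf (T : PySem.Dict Int (List Int)) (lastnode : Option Int) (node : Int) (rest : List Int) : List Int :=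
  ((T.get? node).getD []).filter (fun nb => !decide (some nb = prevOf lastnode rest) && (T.get? nb).isSome)

-- all complete (maximal) non-backtracking walks extending the partial walk p, deepest-first,
-- in first-branch-first (preorder) order
def dfsW (T : PySem.Dict Int (List Int)) (lastnode : Option Int) : Nat → List Int → List (List Int)
  | 0, _ => []
  | _ + 1, [] => []
  | fuel + 1, node :: rest =>
    let cs := csOf T lastnode node rest
    if cs.isEmpty then [node :: rest]
    else cs.flatMap (fun nb =>
      if (node :: rest).contains nb = true then [nb :: node :: rest]
      else dfsW T lastnode fuel (nb :: node :: rest))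

-- ---------- A-side: lpGoA computes the first longest walk of the preorder list ----------

theorem foldl_skip {α β : Type} (g : β → α → β) (p : α → Bool)
    (h : ∀ b a, p a = false → g b a = b) :
    ∀ (l : List α) (b : β), l.foldl g b = (l.filter p).foldl g b := by
  intro l
  induction l with
  | nil => intro b; rfl
  | cons a l ih =>
    intro b
    by_cases hp : p a = true
    · simp [List.filter_cons, hp, ih]
    · simp only [Bool.not_eq_true] at hp
      simp [List.filter_cons, hp, h b a hp, ih]

theorem pick_append (a b p : List Int) : pick (a ++ p) (b ++ p) = pick a b ++ p := by
  unfold pick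
  simp only [List.length_append]
  split_ifs <;> first | rfl | omega

theorem foldl_pick_append (p : List Int) (s : Int → List Int) :
    ∀ (cs : List Int) (acc : List Int),
      cs.foldl (fun a nb => pick a (s nb ++ p)) (acc ++ p) = cs.foldl (fun a nb => pick a (s nb)) acc ++ p := by
  intro cs
  induction cs with
  | nil => intro acc; rfl
  | cons c cs ih =>
    intro acc
    simp only [List.foldl_cons]
    rw [pick_append, ih]

theorem countP_lt_of_mem {K : List Int} {a : Int} {p q : Int → Bool}
    (ha : a ∈ K) (hpa : p a = true) (hqa : q a = false) (himp : ∀ x, q x = true → p x = true) :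
    K.countP q < K.countP p := by
  induction K with
  | nil => cases ha
  | cons k K ih =>
    rcases List.mem_cons.mp ha with h | h
    · subst h
      rw [List.countP_cons, List.countP_cons, hpa, hqa]
      simp only [Bool.false_eq_true, if_false, if_true]
      have : K.countP q ≤ K.countP p := List.countP_mono_left (fun x _ hx => himp x hx)
      omega
    · rw [List.countP_cons, List.countP_cons]
      have := ih h
      have hkq : (if q k = true then 1 else 0) ≤ (if p k = true then 1 else 0) := by
        by_cases hq : q k = true
        · rw [if_pos hq, if_pos (himp k hq)]
        · simp only [Bool.not_eq_true] at hq
          rw [hq]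
          simp only [Bool.false_eq_true, if_false]
          exact Nat.zero_le _
      omega

theorem lpGoA_none {f : Nat} {aT : PySem.Dict Int (List Int)} {node : Int} {prev : Option Int}
    (h : aT.get? node = none) : lpGoA f aT node prev = [] := by
  cases f with
  | zero => rfl
  | succ f => simp [lpGoA, h]

-- A's value at a revisited node: the entry has been emptied, so the loop is empty
theorem lpGoA_empty {f : Nat} {aT : PySem.Dict Int (List Int)} {node : Int} {prev : Option Int}
    (h : aT.get? node = some []) : lpGoA (f + 1) aT node prev = [node] := by
  simp [lpGoA, h]

theorem pick_nil {x : List Int} (h : x ≠ []) : pick [] x = x := by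
  unfold pick
  rw [if_pos]
  cases x with
  | nil => exact absurd rfl h
  | cons a l => simp

theorem lpGoA_ne_nil {f : Nat} {aT : PySem.Dict Int (List Int)} {node : Int} {prev : Option Int}
    {v : List Int} (h : aT.get? node = some v) : lpGoA (f + 1) aT node prev ≠ [] := by
  simp [lpGoA, h]

theorem foldl_flatMap' {α : Type} (g : α → List (List Int)) :
    ∀ (l : List α) (b : List Int),
      (l.flatMap g).foldl pick b = l.foldl (fun b a => (g a).foldl pick b) b := by
  intro l
  induction l with
  | nil => intro b; rfl
  | cons a l ih => intro b; simp [List.foldl_append, ih]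

theorem foldl_congr_mem' {α β : Type} (l : List α) (f g : β → α → β)
    (h : ∀ b a, a ∈ l → f b a = g b a) : ∀ b, l.foldl f b = l.foldl g b := by
  induction l with
  | nil => intro b; rfl
  | cons a l ih =>
    intro b
    simp only [List.foldl_cons]
    rw [h b a List.mem_cons_self,
        ih (fun b a ha => h b a (List.mem_cons_of_mem _ ha)) _]

theorem csOf_key {T : PySem.Dict Int (List Int)} {lastnode : Option Int} {node nb : Int}
    {rest : List Int} (h : nb ∈ csOf T lastnode node rest) : (T.get? nb).isSome = true := by
  have := (List.mem_filter.mp h).2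
  exact (Bool.and_eq_true_iff.mp this).2

theorem csOf_ne_prev {T : PySem.Dict Int (List Int)} {lastnode : Option Int} {node nb : Int}
    {rest : List Int} (h : nb ∈ csOf T lastnode node rest) : ¬ some nb = prevOf lastnode rest := by
  have := (Bool.and_eq_true_iff.mp (List.mem_filter.mp h).2).1
  simpa using this

-- The central A-side lemma: lpGoA, run on the dict with the walk's tail emptied, appended to
-- that tail, is the first longest element of the preorder list of complete walks.
theorem lemA (T : PySem.Dict Int (List Int)) (lastnode : Option Int) (K : List Int)
    (HK : ∀ k : Int, (T.get? k).isSome = true → k ∈ K) :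
    ∀ (f : Nat) (node : Int) (rest : List Int) (aT : PySem.Dict Int (List Int)),
      (∀ k, aT.get? k = if k ∈ rest then some [] else T.get? k) →
      (node :: rest).Nodup →
      (∀ x ∈ node :: rest, (T.get? x).isSome = true) →
      K.countP (fun x => decide (x ∉ node :: rest)) + 2 ≤ f →
      lpGoA f aT node (prevOf lastnode rest) ++ rest = fm (dfsW T lastnode f (node :: rest)) := by
  intro f
  induction f with
  | zero => intro node rest aT hinv hnd hkeys hfuel; omega
  | succ f ih =>
    intro node rest aT hinv hnd hkeys hfuel
    have hkey : (T.get? node).isSome = true := hkeys node List.mem_cons_self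
    obtain ⟨nbrs, hnbrs⟩ := Option.isSome_iff_exists.mp hkey
    have hnr : node ∉ rest := (List.nodup_cons.mp hnd).1
    have haTnode : aT.get? node = some nbrs := by rw [hinv, if_neg hnr, hnbrs]
    have hinv' : ∀ k, (aT.insert node []).get? k = if k ∈ node :: rest then some [] else T.get? k := by
      intro k
      rw [PySem.Dict.get?_insert]
      by_cases hk : k = node
      · simp [hk]
      · rw [if_neg hk, hinv]
        simp [List.mem_cons, hk]
    have hrestkeys : ∀ x ∈ rest, (T.get? x).isSome = true :=
      fun x hx => hkeys x (List.mem_cons_of_mem _ hx)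
    simp only [lpGoA, haTnode]
    show ((nbrs.foldl (fun path nb =>
            if some nb = prevOf lastnode rest then path
            else pick path (lpGoA f (aT.insert node []) nb (some node))) []) ++ [node]) ++ rest
          = fm (dfsW T lastnode (f + 1) (node :: rest))
    have hside : ∀ (b : List Int) (nb : Int),
        (!decide (some nb = prevOf lastnode rest) && (T.get? nb).isSome) = false →
        (if some nb = prevOf lastnode rest then b
         else pick b (lpGoA f (aT.insert node []) nb (some node))) = b := by
      intro b nb hnb
      by_cases hp : some nb = prevOf lastnode rest
      · rw [if_pos hp]
      · rw [if_neg hp]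
        have hnone : T.get? nb = none := by
          rcases hg : T.get? nb with _ | v
          · rfl
          · rw [hg] at hnb; simp [hp] at hnb
        have hnbrest : nb ∉ rest := fun hmem => by
          have := hrestkeys nb hmem; rw [hnone] at this; simp at this
        have hanone : (aT.insert node []).get? nb = none := by
          rw [hinv']
          have hnm : nb ∉ node :: rest := by
            intro hmem
            rcases List.mem_cons.mp hmem with rfl | hmem
            · rw [hnbrs] at hnone; cases hnone
            · exact hnbrest hmem
          rw [if_neg hnm, hnone]
        rw [lpGoA_none hanone]
        unfold pick; simp
    rw [foldl_skip
        (fun path nb =>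
          if some nb = prevOf lastnode rest then path
          else pick path (lpGoA f (aT.insert node []) nb (some node)))
        (fun nb => !decide (some nb = prevOf lastnode rest) && (T.get? nb).isSome)
        hside nbrs []]
    have hcsfilter : nbrs.filter
        (fun nb => !decide (some nb = prevOf lastnode rest) && (T.get? nb).isSome)
        = csOf T lastnode node rest := by
      simp [csOf, hnbrs]
    rw [hcsfilter]
    rw [foldl_congr_mem' (csOf T lastnode node rest) _
        (fun b nb => pick b (lpGoA f (aT.insert node []) nb (some node)))
        (fun b nb hnb => if_neg (csOf_ne_prev hnb)) []]
    rcases hcsE : csOf T lastnode node rest with _ | ⟨c, cs'⟩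
    · simp only [dfsW, hcsE]
      have hfm : fm [node :: rest] = node :: rest := by
        show pick [] (node :: rest) = node :: rest
        exact pick_nil (by simp)
      simp [hfm]
    · obtain ⟨f', rfl⟩ : ∃ f', f = f' + 1 := ⟨f - 1, by omega⟩
      have hdead : ∀ nb ∈ node :: rest,
          lpGoA (f' + 1) (aT.insert node []) nb (some node) = [nb] := by
        intro nb hmem
        exact lpGoA_empty (by rw [hinv', if_pos hmem])
      have halive : ∀ nb, nb ∈ csOf T lastnode node rest → nb ∉ node :: rest →
          lpGoA (f' + 1) (aT.insert node []) nb (some node) ++ (node :: rest) =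
            fm (dfsW T lastnode (f' + 1) (nb :: node :: rest)) := by
        intro nb hnb hnotmem
        have hkeynb : (T.get? nb).isSome = true := csOf_key hnb
        have hfuel' : K.countP (fun x => decide (x ∉ nb :: node :: rest)) + 2 ≤ f' + 1 := by
          have hlt : K.countP (fun x => decide (x ∉ nb :: node :: rest)) <
              K.countP (fun x => decide (x ∉ node :: rest)) := by
            apply countP_lt_of_mem (HK nb hkeynb)
            · simpa using hnotmem
            · simp
            · intro x hx
              simp at hx ⊢
              tauto
          omega
        exact ih nb (node :: rest) (aT.insert node []) hinv'
          (by rw [List.nodup_cons]; exact ⟨hnotmem, hnd⟩)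
          (by
            intro x hx
            rcases List.mem_cons.mp hx with rfl | hx
            · exact hkeynb
            · exact hkeys x hx)
          hfuel'
      have hchild : ∀ (acc : List Int) (nb : Int), nb ∈ csOf T lastnode node rest →
          ((if (node :: rest).contains nb = true then [nb :: node :: rest]
            else dfsW T lastnode (f' + 1) (nb :: node :: rest)).foldl pick acc)
            = pick acc (lpGoA (f' + 1) (aT.insert node []) nb (some node) ++ (node :: rest)) := by
        intro acc nb hnb
        by_cases hc : (node :: rest).contains nb = true
        · rw [if_pos hc]
          have hmem : nb ∈ node :: rest := by simpa using hc
          rw [hdead nb hmem]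
          rfl
        · rw [if_neg hc]
          have hnotmem : nb ∉ node :: rest := by simpa using hc
          rw [foldl_pick_acc]
          show pick acc (fm (dfsW T lastnode (f' + 1) (nb :: node :: rest))) = _
          rw [← halive nb hnb hnotmem]
      have hcmem : c ∈ csOf T lastnode node rest := by rw [hcsE]; exact List.mem_cons_self
      have hcval : ∃ w, (aT.insert node []).get? c = some w := by
        by_cases hm : c ∈ node :: rest
        · exact ⟨[], by rw [hinv', if_pos hm]⟩
        · obtain ⟨w, hw⟩ := Option.isSome_iff_exists.mp (csOf_key hcmem)
          exact ⟨w, by rw [hinv', if_neg hm, hw]⟩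
      obtain ⟨w, hw⟩ := hcval
      have hcne : lpGoA (f' + 1) (aT.insert node []) c (some node) ≠ [] := lpGoA_ne_nil hw
      have hdfsW : fm (dfsW T lastnode (f' + 1 + 1) (node :: rest)) = fm ((c :: cs').flatMap (fun nb =>
          if (node :: rest).contains nb = true then [nb :: node :: rest]
          else dfsW T lastnode (f' + 1) (nb :: node :: rest))) := by
        congr 1
        rw [dfsW]
        simp only [hcsE, List.isEmpty_cons, Bool.false_eq_true, if_false]
      rw [hdfsW]
      simp only [fm]
      rw [foldl_flatMap']
      rw [foldl_congr_mem' (c :: cs') _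
          (fun b nb => pick b (lpGoA (f' + 1) (aT.insert node []) nb (some node) ++ (node :: rest)))
          (fun b nb hnb => hchild b nb (by rw [hcsE]; exact hnb)) []]
      simp only [List.foldl_cons]
      rw [pick_nil hcne, pick_nil (x := lpGoA (f' + 1) (aT.insert node []) c (some node) ++ (node :: rest)) (by simp),
          foldl_pick_append (node :: rest)
            (fun nb => lpGoA (f' + 1) (aT.insert node []) nb (some node)) cs'
            (lpGoA (f' + 1) (aT.insert node []) c (some node))]
      simp

-- ---------- B-side: the loop folds 'pick' over the level-by-level emission list ----------

def emsItem (T : PySem.Dict Int (List Int)) (lastnode : Option Int) (it : List Int × Bool) : List (List Int) :=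
  if it.2 = false then [it.1]
  else match it.1 with
    | [] => []
    | node :: rest => if (csOf T lastnode node rest).isEmpty then [node :: rest] else []

def childItems (T : PySem.Dict Int (List Int)) (lastnode : Option Int) (it : List Int × Bool) :
    List (List Int × Bool) :=
  if it.2 = false then []
  else match it.1 with
    | [] => []
    | node :: rest => (csOf T lastnode node rest).map
        (fun nb => (nb :: node :: rest, !((node :: rest).contains nb)))

def levF (T : PySem.Dict Int (List Int)) (lastnode : Option Int) (F : List (List Int × Bool)) : List (List Int) :=
  F.flatMap (emsItem T lastnode)

def nextF (T : PySem.Dict Int (List Int)) (lastnode : Option Int) (F : List (List Int × Bool)) :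
    List (List Int × Bool) :=
  F.flatMap (childItems T lastnode)

def emits (T : PySem.Dict Int (List Int)) (lastnode : Option Int) : Nat → List (List Int × Bool) → List (List Int)
  | 0, _ => []
  | fuel + 1, F => levF T lastnode F ++ emits T lastnode fuel (nextF T lastnode F)

def dfsF (T : PySem.Dict Int (List Int)) (lastnode : Option Int) (fuel : Nat) (F : List (List Int × Bool)) :
    List (List Int) :=
  F.flatMap (fun it => if it.2 = true then dfsW T lastnode fuel it.1 else [it.1])

theorem emsItem_dead (T : PySem.Dict Int (List Int)) (lastnode : Option Int) (p : List Int) :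
    emsItem T lastnode (p, false) = [p] := rfl

theorem emsItem_alive (T : PySem.Dict Int (List Int)) (lastnode : Option Int) (node : Int) (rest : List Int) :
    emsItem T lastnode (node :: rest, true) =
      if (csOf T lastnode node rest).isEmpty = true then [node :: rest] else [] := rfl

theorem childItems_alive (T : PySem.Dict Int (List Int)) (lastnode : Option Int) (node : Int) (rest : List Int) :
    childItems T lastnode (node :: rest, true) =
      (csOf T lastnode node rest).map (fun nb => (nb :: node :: rest, !((node :: rest).contains nb))) := rfl

theorem childItems_dead (T : PySem.Dict Int (List Int)) (lastnode : Option Int) (p : List Int) :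
    childItems T lastnode (p, false) = [] := rfl

theorem inner_char (T : PySem.Dict Int (List Int)) (path : List Int) (prev : Option Int) :
    ∀ (nbrs : List Int) (acc : List (List Int × Bool)) (g : Bool),
      nbrs.foldl (fun (acc2 : List (List Int × Bool) × Bool) nb =>
          if some nb = prev ∨ (T.get? nb).isNone then acc2
          else (acc2.1 ++ [(nb :: path, !(path.contains nb))], true)) (acc, g)
      = (acc ++ (nbrs.filter (fun nb => !decide (some nb = prev) && (T.get? nb).isSome)).map
            (fun nb => (nb :: path, !(path.contains nb))),
         g || !(nbrs.filter (fun nb => !decide (some nb = prev) && (T.get? nb).isSome)).isEmpty) := by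
  intro nbrs
  induction nbrs with
  | nil => intro acc g; simp
  | cons nb nbrs ih =>
    intro acc g
    simp only [List.foldl_cons, List.filter_cons]
    by_cases hskip : (some nb = prev ∨ (T.get? nb).isNone)
    · rw [if_pos hskip]
      have hcf : (!decide (some nb = prev) && (T.get? nb).isSome) = false := by
        rcases hskip with h | h
        · simp [h]
        · rcases hg : T.get? nb with _ | v
          · simp
          · rw [hg] at h; simp at h
      rw [ih]
      simp [hcf]
    · rw [if_neg hskip]
      push_neg at hskip
      obtain ⟨h1, h2⟩ := hskip
      have hct : (!decide (some nb = prev) && (T.get? nb).isSome) = true := by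
        rcases hg : T.get? nb with _ | v
        · rw [hg] at h2; simp at h2
        · simp [h1]
      rw [ih]
      simp [hct]

theorem step_char (T : PySem.Dict Int (List Int)) (lastnode : Option Int)
    (acc : List (List Int × Bool)) (b : List Int) (it : List Int × Bool) :
    lpStepItemB T lastnode (acc, b) it =
      (acc ++ childItems T lastnode it, (emsItem T lastnode it).foldl pick b) := by
  obtain ⟨p, a⟩ := it
  cases a with
  | false =>
    rw [emsItem_dead, childItems_dead]
    simp [lpStepItemB, pick]
  | true =>
    cases p with
    | nil => simp [lpStepItemB, emsItem, childItems]
    | cons node rest =>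
      rw [emsItem_alive, childItems_alive]
      show (let r := ((T.get? node).getD []).foldl (fun (acc2 : List (List Int × Bool) × Bool) nb =>
              if some nb = prevOf lastnode rest ∨ (T.get? nb).isNone then acc2
              else (acc2.1 ++ [(nb :: node :: rest, !((node :: rest).contains nb))], true)) (acc, false)
            (r.1, if r.2 = false ∧ (node :: rest).length > b.length then node :: rest else b)) = _
      rw [inner_char]
      have hcs_eq : ((T.get? node).getD []).filter
          (fun nb => !decide (some nb = prevOf lastnode rest) && (T.get? nb).isSome) =
          csOf T lastnode node rest := rfl
      rw [hcs_eq]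
      by_cases hcs : (csOf T lastnode node rest).isEmpty = true
      · have hnil := List.isEmpty_iff.mp hcs
        simp [hnil, pick]
      · have h1 : (!(csOf T lastnode node rest).isEmpty) = true := by simp [hcs]
        rw [h1, if_neg hcs]
        simp

theorem level_char (T : PySem.Dict Int (List Int)) (lastnode : Option Int) :
    ∀ (F : List (List Int × Bool)) (acc : List (List Int × Bool)) (b : List Int),
      F.foldl (lpStepItemB T lastnode) (acc, b) =
        (acc ++ nextF T lastnode F, (levF T lastnode F).foldl pick b) := by
  intro F
  induction F with
  | nil => intro acc b; simp [nextF, levF]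
  | cons it F ih =>
    intro acc b
    simp only [List.foldl_cons]
    rw [step_char, ih]
    simp [nextF, levF, List.foldl_append]

theorem emits_nil (T : PySem.Dict Int (List Int)) (lastnode : Option Int) :
    ∀ f, emits T lastnode f [] = [] := by
  intro f
  induction f with
  | zero => rfl
  | succ f ih => simp [emits, levF, nextF, ih]

theorem lemB (T : PySem.Dict Int (List Int)) (lastnode : Option Int) :
    ∀ (f : Nat) (F : List (List Int × Bool)) (b : List Int),
      lpLoopB T lastnode f F b = (emits T lastnode f F).foldl pick b := by
  intro f
  induction f with
  | zero => intro F b; rfl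
  | succ f ih =>
    intro F b
    cases F with
    | nil => rw [emits_nil]; rfl
    | cons it F =>
      show lpLoopB T lastnode (f + 1) (it :: F) b = _
      unfold lpLoopB
      rw [level_char]
      simp only [emits, List.foldl_append]
      rw [ih]
      simp

-- ---------- the regrading argument: BFS emissions vs preorder, length by length ----------

def ItemInv (T : PySem.Dict Int (List Int)) (n : Nat) (it : List Int × Bool) : Prop :=
  it.1.length = n + 1 ∧ it.1.tail.Nodup ∧ (∀ x ∈ it.1.tail, (T.get? x).isSome = true) ∧
    (it.2 = true → it.1.Nodup ∧ ∀ x ∈ it.1, (T.get? x).isSome = true)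

theorem dfsW_len_lb (T : PySem.Dict Int (List Int)) (lastnode : Option Int) :
    ∀ (f : Nat) (p : List Int) (w : List Int), w ∈ dfsW T lastnode f p → p.length ≤ w.length := by
  intro f
  induction f with
  | zero => intro p w h; cases h
  | succ f ih =>
    intro p w h
    cases p with
    | nil => cases h
    | cons node rest =>
      rw [dfsW] at h
      by_cases hcs : (csOf T lastnode node rest).isEmpty
      · rw [if_pos hcs] at h
        rcases List.mem_singleton.mp h with rfl
        rfl
      · rw [if_neg hcs] at h
        rcases List.mem_flatMap.mp h with ⟨nb, _, hw⟩
        by_cases hc : (node :: rest).contains nb = true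
        · rw [if_pos hc] at hw
          rcases List.mem_singleton.mp hw with rfl
          simp
        · rw [if_neg hc] at hw
          have := ih _ _ hw
          simp only [List.length_cons] at this ⊢
          omega

theorem mem_emsItem {T : PySem.Dict Int (List Int)} {lastnode : Option Int} {it : List Int × Bool}
    {w : List Int} (h : w ∈ emsItem T lastnode it) : w = it.1 := by
  obtain ⟨p, a⟩ := it
  cases a with
  | false => simpa [emsItem] using h
  | true =>
    cases p with
    | nil => simp [emsItem] at h
    | cons node rest =>
      simp only [emsItem, Bool.true_eq_false, if_false] at h
      split_ifs at h with h2
      · simpa using h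
      · cases h

theorem mem_childItems {T : PySem.Dict Int (List Int)} {lastnode : Option Int} {it : List Int × Bool}
    {it' : List Int × Bool} (h : it' ∈ childItems T lastnode it) :
    ∃ nb, it' = (nb :: it.1, !(it.1.contains nb)) ∧ nb ∈ csOf T lastnode (it.1.headI) it.1.tail ∧ it.2 = true ∧ it.1 ≠ [] := by
  obtain ⟨p, a⟩ := it
  cases a with
  | false => simp [childItems] at h
  | true =>
    cases p with
    | nil => simp [childItems] at h
    | cons node rest =>
      simp only [childItems, Bool.true_eq_false, if_false] at h
      rcases List.mem_map.mp h with ⟨nb, hnb, heq⟩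
      exact ⟨nb, heq.symm, hnb, rfl, by simp⟩

theorem emits_len_lb (T : PySem.Dict Int (List Int)) (lastnode : Option Int) :
    ∀ (f : Nat) (n : Nat) (F : List (List Int × Bool)),
      (∀ it ∈ F, it.1.length = n + 1) →
      ∀ w ∈ emits T lastnode f F, n + 1 ≤ w.length := by
  intro f
  induction f with
  | zero => intro n F _ w h; cases h
  | succ f ih =>
    intro n F hF w h
    rw [emits] at h
    rcases List.mem_append.mp h with h | h
    · rcases List.mem_flatMap.mp h with ⟨it, hit, hw⟩
      rw [mem_emsItem hw, hF it hit]
    · have : ∀ it' ∈ nextF T lastnode F, it'.1.length = n + 2 := by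
        intro it' hit'
        rcases List.mem_flatMap.mp hit' with ⟨it, hit, hc⟩
        rcases mem_childItems hc with ⟨nb, rfl, _, _, _⟩
        simp [hF it hit]
      have := ih (n + 1) _ this w h
      omega

theorem item_len_le (T : PySem.Dict Int (List Int)) (K : List Int)
    (HK : ∀ k : Int, (T.get? k).isSome = true → k ∈ K)
    {n : Nat} {it : List Int × Bool} (h : ItemInv T n it) : n ≤ K.length := by
  rcases h with ⟨hlen, hnodup, hkeys, _⟩
  have hsub : it.1.tail ⊆ K := fun x hx => HK x (hkeys x hx)
  have h1 : it.1.tail.length ≤ K.length := by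
    have hcard : it.1.tail.toFinset.card = it.1.tail.length := List.toFinset_card_of_nodup hnodup
    have hsub' : it.1.tail.toFinset ⊆ K.toFinset := by
      intro x hx; rw [List.mem_toFinset] at hx ⊢; exact hsub hx
    have := Finset.card_le_card hsub'
    have := K.toFinset_card_le
    omega
  have : it.1.tail.length = n := by
    cases hit : it.1 with
    | nil => rw [hit] at hlen; simp at hlen
    | cons a l =>
      rw [hit] at hlen
      simp only [List.length_cons] at hlen
      simp only [List.tail_cons]
      omega
  omega

theorem itemUnfold (T : PySem.Dict Int (List Int)) (lastnode : Option Int) (f : Nat) (it : List Int × Bool) :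
    (if it.2 = true then dfsW T lastnode (f + 1) it.1 else [it.1]) =
      emsItem T lastnode it ++ dfsF T lastnode f (childItems T lastnode it) := by
  obtain ⟨p, a⟩ := it
  cases a with
  | false => simp [emsItem, childItems, dfsF]
  | true =>
    cases p with
    | nil => simp [emsItem, childItems, dfsW, dfsF]
    | cons node rest =>
      show dfsW T lastnode (f + 1) (node :: rest) = _
      rw [emsItem_alive, childItems_alive, dfsW]
      by_cases hcs : (csOf T lastnode node rest).isEmpty = true
      · have hnil := List.isEmpty_iff.mp hcs
        simp [hnil, dfsF]
      · rw [if_neg hcs, if_neg hcs]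
        simp only [List.nil_append]
        unfold dfsF
        rw [List.flatMap_map]
        congr 1
        funext nb
        dsimp only
        by_cases hc : (node :: rest).contains nb = true
        · rw [if_pos hc, if_neg (by simp at hc ⊢; tauto)]
        · rw [if_neg hc, if_pos (by simp_all)]

theorem flatMap_congr_mem {α β : Type} (l : List α) (f g : α → List β)
    (h : ∀ a ∈ l, f a = g a) : l.flatMap f = l.flatMap g := by
  induction l with
  | nil => rfl
  | cons a l ih =>
    simp only [List.flatMap_cons]
    rw [h a List.mem_cons_self, ih (fun a ha => h a (List.mem_cons_of_mem _ ha))]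

theorem filter_flatMap' {α : Type} (p : List Int → Bool) (g : α → List (List Int)) :
    ∀ l : List α, (l.flatMap g).filter p = l.flatMap (fun a => (g a).filter p) := by
  intro l
  induction l with
  | nil => rfl
  | cons a l ih => simp [List.filter_append, ih]

theorem dfsF_flatMap {α : Type} (T : PySem.Dict Int (List Int)) (lastnode : Option Int) (f : Nat)
    (g : α → List (List Int × Bool)) :
    ∀ l : List α, dfsF T lastnode f (l.flatMap g) = l.flatMap (fun a => dfsF T lastnode f (g a)) := by
  intro l
  induction l with
  | nil => rfl
  | cons a l ih => simp only [List.flatMap_cons, dfsF, List.flatMap_append] at ih ⊢; rw [ih]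

theorem mem_dfsF_len {T : PySem.Dict Int (List Int)} {lastnode : Option Int} {f : Nat}
    {F : List (List Int × Bool)} {m : Nat} (hF : ∀ it ∈ F, it.1.length = m)
    {w : List Int} (h : w ∈ dfsF T lastnode f F) : m ≤ w.length := by
  rcases List.mem_flatMap.mp h with ⟨it, hit, hw⟩
  by_cases h2 : it.2 = true
  · rw [if_pos h2] at hw
    have := dfsW_len_lb T lastnode f it.1 w hw
    rw [hF it hit] at this
    exact this
  · rw [if_neg h2] at hw
    rcases List.mem_singleton.mp hw with rfl
    rw [hF it hit]

theorem nextF_inv (T : PySem.Dict Int (List Int)) (lastnode : Option Int) {n : Nat}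
    {F : List (List Int × Bool)} (hF : ∀ it ∈ F, ItemInv T n it) :
    ∀ it' ∈ nextF T lastnode F, ItemInv T (n + 1) it' := by
  intro it' h'
  rcases List.mem_flatMap.mp h' with ⟨it, hit, hc⟩
  rcases mem_childItems hc with ⟨nb, rfl, hnb, h2, _⟩
  obtain ⟨hlen, htl, hkeys, halive⟩ := hF it hit
  obtain ⟨hnd, hks⟩ := halive h2
  have hnbkey : (T.get? nb).isSome = true := by
    have := (List.mem_filter.mp hnb).2
    exact (Bool.and_eq_true_iff.mp this).2
  refine ⟨by simp [hlen], by simpa using hnd, by simpa using hks, ?_⟩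
  intro ha
  simp only [Bool.not_eq_true'] at ha
  have hnotmem : nb ∉ it.1 := by
    intro hmem
    have : it.1.contains nb = true := by simpa using hmem
    rw [this] at ha
    cases ha
  constructor
  · simpa using ⟨hnotmem, hnd⟩
  · intro x hx
    rcases List.mem_cons.mp hx with rfl | hx
    · exact hnbkey
    · exact hks x hx

theorem grading (T : PySem.Dict Int (List Int)) (lastnode : Option Int) (K : List Int)
    (HK : ∀ k : Int, (T.get? k).isSome = true → k ∈ K) :
    ∀ (f : Nat) (n : Nat) (F : List (List Int × Bool)) (L : Nat),
      K.length + 2 ≤ f + n →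
      (∀ it ∈ F, ItemInv T n it) →
      (emits T lastnode f F).filter (fun w => decide (w.length = L)) =
        (dfsF T lastnode f F).filter (fun w => decide (w.length = L)) := by
  intro f
  induction f with
  | zero =>
    intro n F L hb hF
    have hFnil : F = [] := by
      cases F with
      | nil => rfl
      | cons it F' =>
        exfalso
        have := item_len_le T K HK (hF it List.mem_cons_self)
        omega
    subst hFnil
    rfl
  | succ f ih =>
    intro n F L hb hF
    have hunf : dfsF T lastnode (f + 1) F =
        F.flatMap (fun it => emsItem T lastnode it ++ dfsF T lastnode f (childItems T lastnode it)) := by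
      unfold dfsF
      rw [show (fun (it : List Int × Bool) => if it.2 = true then dfsW T lastnode (f + 1) it.1 else [it.1])
            = (fun it => emsItem T lastnode it ++ dfsF T lastnode f (childItems T lastnode it))
          from funext (itemUnfold T lastnode f)]
      rfl
    have hnextlen : ∀ it' ∈ nextF T lastnode F, it'.1.length = n + 2 := by
      intro it' h'
      have := nextF_inv T lastnode hF it' h'
      exact this.1
    rw [emits, List.filter_append, hunf, filter_flatMap']
    by_cases hL : L = n + 1
    · subst hL
      have hlev : ∀ (it : List Int × Bool), it ∈ F →
          (emsItem T lastnode it ++ dfsF T lastnode f (childItems T lastnode it)).filter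
            (fun w => decide (w.length = n + 1)) = emsItem T lastnode it := by
        intro it hit
        rw [List.filter_append]
        have h1 : (emsItem T lastnode it).filter (fun w => decide (w.length = n + 1)) = emsItem T lastnode it := by
          apply List.filter_eq_self.mpr
          intro w hw
          rw [mem_emsItem hw]
          simp [(hF it hit).1]
        have h2 : (dfsF T lastnode f (childItems T lastnode it)).filter (fun w => decide (w.length = n + 1)) = [] := by
          apply List.filter_eq_nil_iff.mpr
          intro w hw
          have hm : n + 2 ≤ w.length := by
            apply mem_dfsF_len (m := n + 2) ?_ hw
            intro it' hit'
            exact hnextlen it' (List.mem_flatMap.mpr ⟨it, hit, hit'⟩)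
          simp
          omega
        rw [h1, h2, List.append_nil]
      have hflat : F.flatMap (fun it => (emsItem T lastnode it ++ dfsF T lastnode f (childItems T lastnode it)).filter
            (fun w => decide (w.length = n + 1))) = levF T lastnode F := by
        unfold levF
        exact flatMap_congr_mem F _ _ hlev
      have hlevf : (levF T lastnode F).filter (fun w => decide (w.length = n + 1)) = levF T lastnode F := by
        apply List.filter_eq_self.mpr
        intro w hw
        rcases List.mem_flatMap.mp hw with ⟨it, hit, hw'⟩
        rw [mem_emsItem hw']
        simp [(hF it hit).1]
      have hrest : (emits T lastnode f (nextF T lastnode F)).filter (fun w => decide (w.length = n + 1)) = [] := by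
        apply List.filter_eq_nil_iff.mpr
        intro w hw
        have := emits_len_lb T lastnode f (n + 1) (nextF T lastnode F)
          (fun it' h' => by rw [hnextlen it' h']) w hw
        simp
        omega
      rw [hlevf, hrest, List.append_nil, hflat]
    · have hlev0 : (levF T lastnode F).filter (fun w => decide (w.length = L)) = [] := by
        apply List.filter_eq_nil_iff.mpr
        intro w hw
        rcases List.mem_flatMap.mp hw with ⟨it, hit, hw'⟩
        rw [mem_emsItem hw']
        simp [(hF it hit).1]
        omega
      have hitem : ∀ (it : List Int × Bool), it ∈ F →
          (emsItem T lastnode it ++ dfsF T lastnode f (childItems T lastnode it)).filter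
            (fun w => decide (w.length = L)) =
          (dfsF T lastnode f (childItems T lastnode it)).filter (fun w => decide (w.length = L)) := by
        intro it hit
        rw [List.filter_append]
        have h1 : (emsItem T lastnode it).filter (fun w => decide (w.length = L)) = [] := by
          apply List.filter_eq_nil_iff.mpr
          intro w hw
          rw [mem_emsItem hw]
          simp [(hF it hit).1]
          omega
        rw [h1, List.nil_append]
      have hflat : F.flatMap (fun it => (emsItem T lastnode it ++ dfsF T lastnode f (childItems T lastnode it)).filter
            (fun w => decide (w.length = L))) =
          (dfsF T lastnode f (nextF T lastnode F)).filter (fun w => decide (w.length = L)) := by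
        rw [show nextF T lastnode F = F.flatMap (childItems T lastnode) from rfl, dfsF_flatMap, filter_flatMap']
        exact flatMap_congr_mem F _ _ hitem
      rw [hlev0, List.nil_append, hflat]
      exact ih (n + 1) (nextF T lastnode F) L (by omega) (nextF_inv T lastnode hF)

-- ===== VERDICT (by name: the statement is the Claim_ definition above) =====
theorem longest_path_py_spec : Claim_equal_longest_path_py := by
  intro tree start lastnode _
  unfold Spec_longest_path_py longest_path_py longest_path_py_alt
  show lpGoA (tree.length + 2) (PySem.Dict.mk tree) start lastnode =
    if ((PySem.Dict.mk tree).get? start).isNone = true then []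
    else lpLoopB (PySem.Dict.mk tree) lastnode (tree.length + 2) [([start], true)] []
  by_cases hs : ((PySem.Dict.mk tree).get? start).isNone = true
  · rw [if_pos hs]
    exact lpGoA_none (Option.isNone_iff_eq_none.mp hs)
  · rw [if_neg hs]
    obtain ⟨v, hv⟩ : ∃ v, (PySem.Dict.mk tree).get? start = some v := by
      rcases hq : (PySem.Dict.mk tree).get? start with _ | v
      · rw [hq] at hs; simp at hs
      · exact ⟨v, rfl⟩
    have hstartkey : ((PySem.Dict.mk tree).get? start).isSome = true := by rw [hv]; rfl
    have HK : ∀ k : Int, ((PySem.Dict.mk tree).get? k).isSome = true → k ∈ tree.map Prod.fst := by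
      intro k hk
      have hcont : (PySem.Dict.mk tree).contains k = true := by
        rw [PySem.Dict.contains_eq_isSome_get?, hk]
      have hmem : k ∈ (PySem.Dict.mk tree).keys := (PySem.Dict.contains_iff_mem_keys _ _).mp hcont
      simpa [pysem] using hmem
    have hA := lemA (PySem.Dict.mk tree) lastnode (tree.map Prod.fst) HK (tree.length + 2)
      start [] (PySem.Dict.mk tree)
      (fun k => by simp)
      (by simp)
      (fun x hx => by rw [List.mem_singleton.mp hx]; exact hstartkey)
      (by
        have h1 : (tree.map Prod.fst).countP (fun x => decide (x ∉ [start])) ≤ (tree.map Prod.fst).length :=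
          List.countP_le_length
        rw [List.length_map] at h1
        omega)
    simp only [prevOf, List.append_nil] at hA
    rw [lemB]
    have hinv0 : ∀ it ∈ [(([start] : List Int), true)], ItemInv (PySem.Dict.mk tree) 0 it := by
      intro it hit
      rw [List.mem_singleton.mp hit]
      refine ⟨rfl, by simp, by simp, fun _ => ⟨by simp, ?_⟩⟩
      intro x hx
      rw [List.mem_singleton.mp hx]
      exact hstartkey
    have hg := fun L => grading (PySem.Dict.mk tree) lastnode (tree.map Prod.fst) HK
      (tree.length + 2) 0 [(([start] : List Int), true)] L
      (by rw [List.length_map]) hinv0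
    rw [foldl_pick_congr_of_filters [] hg]
    have hdfsF : dfsF (PySem.Dict.mk tree) lastnode (tree.length + 2) [(([start] : List Int), true)] =
        dfsW (PySem.Dict.mk tree) lastnode (tree.length + 2) [start] := by
      simp [dfsF]
    rw [hdfsF]
    exact hA
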